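-- pv_equiv track=rewrite | github.com/rrwt/daily-coding-challenge | daily_problems/problem_201_to_300/285.py | view_sun
-- ===== SOURCE A (Python) =====
-- from typing import List
--
-- def view_sun(buildings: List[int]) -> int:
--     max_height = 0
--     count = 0
--
--     for height in buildings[::-1]:
--         if height > max_height:
--             count += 1
--             max_height = height
--
--     return count
-- ===== SOURCE B (Python) =====
-- from typing import List
--
--
-- def view_sun(buildings: List[int]) -> int:
--     # Monotonic stack of still-visible (positive) heights, scanned left-to-right.
--     stack = []
--     for height in buildings:
--         while stack and stack[-1] <= height:
--             stack.pop()
--         if height > 0: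
--             stack.append(height)
--     return len(stack)
-- ===== Notes on version B (the rewrite author's own statement) =====
-- stated objective: alternative
-- what changed: Replaces the reversed scan with a single running max by a left-to-right pass maintaining a strictly decreasing monotonic stack of still-visible positive heights; the answer is the final stack size.
import Mathlib
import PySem

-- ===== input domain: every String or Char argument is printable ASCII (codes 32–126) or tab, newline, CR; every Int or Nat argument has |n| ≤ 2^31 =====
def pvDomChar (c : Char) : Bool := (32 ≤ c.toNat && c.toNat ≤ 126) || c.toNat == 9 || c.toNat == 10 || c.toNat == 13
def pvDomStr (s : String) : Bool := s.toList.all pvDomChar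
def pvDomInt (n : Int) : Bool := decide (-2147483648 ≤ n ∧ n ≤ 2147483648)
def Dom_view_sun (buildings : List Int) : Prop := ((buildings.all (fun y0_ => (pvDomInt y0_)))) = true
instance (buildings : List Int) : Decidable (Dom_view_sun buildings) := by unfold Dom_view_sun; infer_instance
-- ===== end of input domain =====

-- B replaces A's reversed scan with a running max by a left-to-right monotonic-stack pass (alternative decomposition, same cost).

-- ===== PORT A =====
-- for height in buildings[::-1]: running (max_height, count)
def view_sun (buildings : List Int) : Int :=
  let rev := (PySem.List.slice? buildings none none (-1)).getD []
  (rev.foldl (fun (s : Int × Int) h => if h > s.1 then (h, s.2 + 1) else s) (0, 0)).2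

-- ===== PORT B =====
-- stack with top at the HEAD of the Lean list (Python's stack top is the list end);
-- the while-pop loop 'while stack and stack[-1] <= height: stack.pop()' is dropWhile (· ≤ height)
def viewSunStep (stack : List Int) (height : Int) : List Int :=
  let popped := stack.dropWhile (fun x => decide (x ≤ height))
  if height > 0 then height :: popped else popped

def view_sun_alt (buildings : List Int) : Int :=
  ((buildings.foldl viewSunStep []).length : Int)

-- ===== PRECONDITION & SPEC =====
def Spec_view_sun (buildings : List Int) (out : Int) : Prop := out = view_sun_alt buildings
instance (buildings : List Int) (out : Int) : Decidable (Spec_view_sun buildings out) := by unfold Spec_view_sun; infer_instance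

-- ===== CLAIM (what is proved, stated in full; the proofs are below) =====
def Claim_equal_view_sun : Prop := ∀ (buildings : List Int), Dom_view_sun buildings → Spec_view_sun buildings (view_sun buildings)

-- ===== LEMMAS AND PROOFS =====

-- A's fold, written as a foldr over the original list (A folds over the reverse)
def viewSunStepA (h : Int) (s : Int × Int) : Int × Int := if h > s.1 then (h, s.2 + 1) else s

-- the running max of A characterised: h beats it iff h is positive and strictly above every element
theorem viewSunA_max_lt (l : List Int) :
    ∀ h : Int, (l.foldr viewSunStepA (0, 0)).1 < h ↔ (0 < h ∧ ∀ x ∈ l, x < h) := by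
  induction l with
  | nil => intro h; simp
  | cons c t ih =>
    intro h
    constructor
    · intro hlt
      simp only [List.foldr_cons, viewSunStepA] at hlt
      by_cases hc : c > (t.foldr viewSunStepA (0, 0)).1
      · rw [if_pos hc] at hlt
        have hch : c < h := hlt
        obtain ⟨hc0, hall⟩ := (ih c).mp hc
        refine ⟨by omega, ?_⟩
        intro x hx
        rcases List.mem_cons.mp hx with rfl | hx
        · exact hch
        · exact lt_trans (hall x hx) hch
      · rw [if_neg hc] at hlt
        obtain ⟨h0, hall⟩ := (ih h).mp hlt
        refine ⟨h0, ?_⟩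
        intro x hx
        rcases List.mem_cons.mp hx with rfl | hx
        · omega
        · exact hall x hx
    · rintro ⟨h0, hall⟩
      simp only [List.foldr_cons, viewSunStepA]
      by_cases hc : c > (t.foldr viewSunStepA (0, 0)).1
      · rw [if_pos hc]; exact hall c (List.mem_cons_self ..)
      · rw [if_neg hc]
        exact (ih h).mpr ⟨h0, fun x hx => hall x (List.mem_cons_of_mem _ hx)⟩

theorem dropWhile_app_last {h c : Int} (s : List Int) (hch : c < h) :
    (s ++ [h]).dropWhile (fun x => decide (x ≤ c)) =
      s.dropWhile (fun x => decide (x ≤ c)) ++ [h] := by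
  induction s with
  | nil => simp [List.dropWhile, show ¬ (h ≤ c) by omega]
  | cons y s ih =>
    by_cases hy : y ≤ c
    · simpa [List.dropWhile, hy] using ih
    · simp [List.dropWhile, hy]

theorem step_app_last {h c : Int} (s : List Int) (hch : c < h) :
    viewSunStep (s ++ [h]) c = viewSunStep s c ++ [h] := by
  simp only [viewSunStep, dropWhile_app_last s hch]
  split_ifs <;> simp

-- a bottom element strictly above everything in t is never popped
theorem foldl_step_shield (t : List Int) :
    ∀ (s : List Int) (h : Int), (∀ x ∈ t, x < h) →
      List.foldl viewSunStep (s ++ [h]) t = List.foldl viewSunStep s t ++ [h] := by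
  induction t with
  | nil => intro s h _; simp
  | cons c t ih =>
    intro s h hall
    have hch : c < h := hall c (List.mem_cons_self ..)
    simp only [List.foldl_cons]
    rw [step_app_last s hch]
    exact ih (viewSunStep s c) h (fun x hx => hall x (List.mem_cons_of_mem _ hx))

-- a bottom element h with everything above it smaller gets popped once some x ≥ h arrives
theorem foldl_step_popped (t : List Int) :
    ∀ (s : List Int) (h : Int), (∀ y ∈ s, y < h) → (∃ x ∈ t, h ≤ x) →
      List.foldl viewSunStep (s ++ [h]) t = List.foldl viewSunStep s t := by
  induction t with
  | nil => rintro s h _ ⟨x, hx, _⟩; cases hx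
  | cons c t ih =>
    intro s h hsmall hex
    simp only [List.foldl_cons]
    by_cases hhc : h ≤ c
    · -- the new height pops everything, including h: both stacks coincide now
      have hs1 : s.dropWhile (fun x => decide (x ≤ c)) = [] := by
        rw [List.dropWhile_eq_nil_iff]
        intro y hy; simpa using le_of_lt (lt_of_lt_of_le (hsmall y hy) hhc)
      have hs2 : (s ++ [h]).dropWhile (fun x => decide (x ≤ c)) = [] := by
        rw [List.dropWhile_eq_nil_iff]
        intro y hy
        rcases List.mem_append.mp hy with hy | hy
        · simpa using le_of_lt (lt_of_lt_of_le (hsmall y hy) hhc)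
        · simp at hy; simpa [hy] using hhc
      simp only [viewSunStep, hs1, hs2]
    · have hch : c < h := by omega
      rw [step_app_last s hch]
      have hsmall' : ∀ y ∈ viewSunStep s c, y < h := by
        intro y hy
        simp only [viewSunStep] at hy
        split_ifs at hy with h0
        · rcases List.mem_cons.mp hy with rfl | hy
          · exact hch
          · exact hsmall y ((List.dropWhile_sublist _).subset hy)
        · exact hsmall y ((List.dropWhile_sublist _).subset hy)
      have hex' : ∃ x ∈ t, h ≤ x := by
        rcases hex with ⟨x, hx, hhx⟩
        rcases List.mem_cons.mp hx with rfl | hx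
        · omega
        · exact ⟨x, hx, hhx⟩
      exact ih (viewSunStep s c) h hsmall' hex'

-- the core correspondence: B's final stack size = A's count
theorem stack_length_eq_count (l : List Int) :
    ((l.foldl viewSunStep []).length : Int) = (l.foldr viewSunStepA (0, 0)).2 := by
  induction l with
  | nil => simp
  | cons h t ih =>
    simp only [List.foldl_cons, List.foldr_cons]
    by_cases h0 : 0 < h
    · have hB : viewSunStep [] h = [] ++ [h] := by simp [viewSunStep, h0]
      by_cases hall : ∀ x ∈ t, x < h
      · have hM : (t.foldr viewSunStepA (0, 0)).1 < h := (viewSunA_max_lt t h).mpr ⟨h0, hall⟩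
        rw [hB, foldl_step_shield t [] h hall]
        simp only [viewSunStepA, if_pos hM]
        simp [ih]
      · push Not at hall
        have hM : ¬ (t.foldr viewSunStepA (0, 0)).1 < h := fun hc => by
          rcases hall with ⟨x, hx, hxh⟩
          have := ((viewSunA_max_lt t h).mp hc).2 x hx
          omega
        rw [hB, foldl_step_popped t [] h (by simp) hall]
        simp only [viewSunStepA, if_neg hM]
        exact ih
    · have hM : ¬ (t.foldr viewSunStepA (0, 0)).1 < h := fun hc =>
        absurd ((viewSunA_max_lt t h).mp hc).1 h0
      have hB : viewSunStep [] h = [] := by simp [viewSunStep, h0]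
      rw [hB]
      simp only [viewSunStepA, if_neg hM]
      exact ih

-- ===== VERDICT (by name: the statement is the Claim_ definition above) =====
theorem view_sun_spec : Claim_equal_view_sun := by
  intro buildings _
  unfold Spec_view_sun view_sun view_sun_alt
  rw [PySem.List.slice?_none_none_neg_one]
  simp only [Option.getD_some, List.foldl_reverse]
  exact (stack_length_eq_count buildings).symm
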